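-- pv_equiv track=rewrite | github.com/kevinlmf/Options_Pricing | time_series_forecasting/multi_agent/agents.py | infer_parameter
-- ===== SOURCE A (Python) =====
-- from typing import Dict, List, Tuple, Optional
--
-- def infer_parameter(action_history: List[Dict]) -> str:
--     """
--     Infer market regime from noise trader clustering.
--
--     Structural Model:
--     regime = 'high_vol' if clustering_high else 'normal'
--
--     Intuition: Noise traders cluster their activity during stress periods.
--     """
--     if len(action_history) < 10:
--         return 'normal'
--
--     # Measure order clustering (consecutive similar actions)
--     recent_actions = action_history[-20:]
--     action_types = [a['type'] for a in recent_actions]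
--
--     # Count consecutive runs
--     max_run = 1
--     current_run = 1
--     for i in range(1, len(action_types)):
--         if action_types[i] == action_types[i-1] and action_types[i] != 'hold':
--             current_run += 1
--             max_run = max(max_run, current_run)
--         else:
--             current_run = 1
--
--     # High clustering → stress regime
--     clustering_threshold = 5
--     if max_run >= clustering_threshold:
--         return 'high_vol'
--     else:
--         return 'normal'
-- ===== SOURCE B (Python) =====
-- def infer_parameter(action_history):
--     if len(action_history) < 10:
--         return 'normal'
--     types = [a['type'] for a in action_history[-20:]]
--     if any(t != 'hold' and types[i:i + 5] == [t] * 5 for i, t in enumerate(types)):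
--         return 'high_vol'
--     return 'normal'
-- ===== Notes on version B (the rewrite author's own statement) =====
-- stated objective: simpler
-- what changed: Replaces the running max_run/current_run counter loop with a direct existence check: high_vol iff some 5-element window of the recent action types is constant and not 'hold'.
import Mathlib
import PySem

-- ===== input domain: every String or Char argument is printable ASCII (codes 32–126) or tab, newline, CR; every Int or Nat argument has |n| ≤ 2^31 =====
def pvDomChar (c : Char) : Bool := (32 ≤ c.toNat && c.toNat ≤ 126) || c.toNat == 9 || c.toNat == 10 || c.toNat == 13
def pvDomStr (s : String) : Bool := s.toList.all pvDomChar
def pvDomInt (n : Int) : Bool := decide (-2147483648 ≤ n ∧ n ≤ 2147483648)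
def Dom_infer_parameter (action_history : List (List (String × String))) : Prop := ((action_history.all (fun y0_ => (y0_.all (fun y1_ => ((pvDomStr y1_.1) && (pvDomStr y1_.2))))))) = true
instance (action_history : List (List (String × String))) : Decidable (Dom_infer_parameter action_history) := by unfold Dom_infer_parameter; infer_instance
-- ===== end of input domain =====

-- B replaces A's running max_run/current_run counter with a direct check for a constant
-- non-'hold' window of 5 among the recent action types (simpler decomposition, same cost).


-- ===== PORT A =====
-- a['type'] on the association list: first match (Python dict lookup); the raising case
-- (missing key) is excluded by Pre_, so .getD "" is never reached with its default there.
def infer_parameter (action_history : List (List (String × String))) : String :=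
  if action_history.length < 10 then "normal" else
  let recent_actions := PySem.List.slice action_history (some (-20)) none
  let action_types := recent_actions.map (fun a => (List.lookup "type" a).getD "")
  let st := (PySem.List.pyRange 1 (action_types.length : Int) 1).foldl
    (fun (st : Int × Int) i =>
      let ti := PySem.List.pyGetD action_types i ""
      let tp := PySem.List.pyGetD action_types (i - 1) ""
      if ti = tp ∧ ti ≠ "hold" then (max st.1 (st.2 + 1), st.2 + 1) else (st.1, 1))
    ((1 : Int), (1 : Int))
  if st.1 ≥ 5 then "high_vol" else "normal"

-- ===== PORT B =====
def infer_parameter_alt (action_history : List (List (String × String))) : String :=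
  if action_history.length < 10 then "normal" else
  let types := (PySem.List.slice action_history (some (-20)) none).map
    (fun a => (List.lookup "type" a).getD "")
  if (PySem.List.enumerate types 0).any
      (fun p => p.2 ≠ "hold" && PySem.List.slice types (some p.1) (some (p.1 + 5)) == List.replicate 5 p.2)
  then "high_vol" else "normal"

-- ===== PRECONDITION & SPEC =====
-- Pre_ excludes exactly the inputs where Python A raises KeyError: length ≥ 10 with some
-- dict in the last-20 slice lacking the key 'type' (B raises there too).
def Pre_infer_parameter (action_history : List (List (String × String))) : Prop :=
  action_history.length < 10 ∨
  (PySem.List.slice action_history (some (-20)) none).all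
    (fun a => (List.lookup "type" a).isSome) = true
instance (action_history : List (List (String × String))) : Decidable (Pre_infer_parameter action_history) := by unfold Pre_infer_parameter; infer_instance
def pvWitness_infer_parameter : (List (List (String × String))) := []
def Spec_infer_parameter (action_history : List (List (String × String))) (out : String) : Prop := out = infer_parameter_alt action_history
instance (action_history : List (List (String × String))) (out : String) : Decidable (Spec_infer_parameter action_history out) := by unfold Spec_infer_parameter; infer_instance

-- ===== CLAIM (what is proved, stated in full; the proofs are below) =====
def Claim_equal_infer_parameter : Prop := ∀ (action_history : List (List (String × String))), Dom_infer_parameter action_history → Pre_infer_parameter action_history → Spec_infer_parameter action_history (infer_parameter action_history)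

-- ===== LEMMAS AND PROOFS =====

-- A's loop body on (prev, current) action types.
def stepA (st : Int × Int) (prev cur : String) : Int × Int :=
  if cur = prev ∧ cur ≠ "hold" then (max st.1 (st.2 + 1), st.2 + 1) else (st.1, 1)

-- A's loop as structural recursion: prev element carried along the list.
def runA (p : String) (r : List String) (st : Int × Int) : Int × Int :=
  match r with
  | [] => st
  | e :: t => runA e t (stepA st p e)

-- maximum current-run value ever produced (1 if no extension step fires)
def best (p : String) (r : List String) (c : Int) : Int :=
  match r with
  | [] => 1
  | e :: t => if e = p ∧ e ≠ "hold" then max (c + 1) (best e t (c + 1)) else best e t 1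

-- ∃ a constant non-'hold' window of 5 in l
def E (l : List String) : Prop :=
  ∃ k : Nat, k < l.length ∧ l.getD k "" ≠ "hold" ∧
    (l.drop k).take 5 = List.replicate 5 (l.getD k "")

-- run-prefix length: how many leading elements of r equal p
def PR (p : String) (r : List String) : Nat := (r.takeWhile (· == p)).length

theorem take_eq_replicate_iff (t : List String) (n : Nat) (x : String) :
    t.take n = List.replicate n x ↔ n ≤ PR x t := by
  induction t generalizing n with
  | nil => cases n <;> simp [PR]
  | cons a t ih =>
    cases n with
    | zero => simp [PR]
    | succ n =>
      by_cases hax : a = x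
      · subst hax
        simp [PR, List.replicate_succ, ih]
      · simp [PR, List.replicate_succ, hax, beq_iff_eq]

theorem range_fold_eq_runA (r : List String) (x : String) (st : Int × Int) :
    (List.range r.length).foldl
      (fun st k => stepA st ((x :: r).getD k "") ((x :: r).getD (k + 1) "")) st
    = runA x r st := by
  induction r generalizing x st with
  | nil => simp [runA]
  | cons e t ih =>
    rw [show (e :: t).length = t.length + 1 from rfl, List.range_succ_eq_map]
    simp only [List.foldl_cons, List.foldl_map, List.getD_cons_zero, List.getD_cons_succ]
    exact ih e (stepA st x e)

theorem pyfold_eq_runA (x : String) (r : List String) :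
    (PySem.List.pyRange 1 ((x :: r).length : Int) 1).foldl
      (fun (st : Int × Int) i =>
        let ti := PySem.List.pyGetD (x :: r) i ""
        let tp := PySem.List.pyGetD (x :: r) (i - 1) ""
        if ti = tp ∧ ti ≠ "hold" then (max st.1 (st.2 + 1), st.2 + 1) else (st.1, 1))
      ((1 : Int), (1 : Int))
    = runA x r ((1 : Int), (1 : Int)) := by
  have hlen : ((((x :: r).length : Nat) : Int) - 1).toNat = r.length := by
    simp
  rw [PySem.List.pyRange_one, hlen, List.foldl_map,
    ← range_fold_eq_runA r x ((1 : Int), (1 : Int))]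
  apply List.foldl_ext
  intro st k hk
  have h1 : (1 : Int) + (k : Int) = ((k + 1 : Nat) : Int) := by push_cast; ring
  have h2 : ((k + 1 : Nat) : Int) - 1 = ((k : Nat) : Int) := by push_cast; ring
  simp only [h1, h2, PySem.List.pyGetD_natCast, stepA]

theorem runA_fst (r : List String) (p : String) (m c : Int) (hm : 1 ≤ m) :
    (runA p r (m, c)).1 = max m (best p r c) := by
  induction r generalizing p m c with
  | nil => simp [runA, best]; omega
  | cons e t ih =>
    by_cases h : e = p ∧ e ≠ "hold"
    · simp only [runA, stepA, if_pos h, best]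
      rw [ih e (max m (c + 1)) (c + 1) (by omega)]
      omega
    · simp only [runA, stepA, best, if_neg h]
      exact ih e m 1 hm

theorem E_cons (e : String) (t : List String) :
    E (e :: t) ↔ (e ≠ "hold" ∧ 4 ≤ PR e t) ∨ E t := by
  constructor
  · rintro ⟨k, hk, hne, heq⟩
    cases k with
    | zero =>
      left
      simp only [List.getD_cons_zero] at hne heq
      rw [List.drop_zero] at heq
      refine ⟨hne, ?_⟩
      rw [show (5:Nat) = 4 + 1 from rfl, List.replicate_succ] at heq
      have : t.take 4 = List.replicate 4 e := by
        simpa using congrArg List.tail heq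
      exact (take_eq_replicate_iff t 4 e).mp this
    | succ k =>
      right
      exact ⟨k, by simpa using hk, by simpa using hne, by simpa using heq⟩
  · rintro (⟨hne, hpr⟩ | ⟨k, hk, hne, heq⟩)
    · refine ⟨0, by simp, by simpa using hne, ?_⟩
      simp only [List.getD_cons_zero, List.drop_zero]
      rw [show (5:Nat) = 4 + 1 from rfl, List.replicate_succ, List.take_succ_cons,
        (take_eq_replicate_iff t 4 e).mpr hpr]
    · exact ⟨k + 1, by simpa using hk, by simpa using hne, by simpa using heq⟩

theorem best_ge_iff (r : List String) (p : String) (c : Int)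
    (h1 : 1 ≤ c) (h5 : c < 5) :
    (5 ≤ best p r c ↔ (p ≠ "hold" ∧ 5 - c ≤ (PR p r : Int)) ∨ E r) := by
  induction r generalizing p c with
  | nil =>
    simp only [best, PR, List.takeWhile_nil, List.length_nil, Nat.cast_zero, E]
    constructor
    · omega
    · rintro (⟨_, h⟩ | ⟨k, hk, _⟩) <;> omega
  | cons e t ih =>
    rw [E_cons]
    by_cases h : e = p ∧ e ≠ "hold"
    · obtain ⟨hep, hh⟩ := h
      subst hep
      have hPR : PR e (e :: t) = PR e t + 1 := by
        simp [PR]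
      rw [show best e (e :: t) c = max (c + 1) (best e t (c + 1)) from by simp [best, hh], hPR]
      by_cases hc : c = 4
      · subst hc
        constructor
        · intro _
          exact Or.inl ⟨hh, by push_cast; omega⟩
        · intro _
          exact le_max_of_le_left (by omega)
      · rw [show (5:Int) ≤ max (c + 1) (best e t (c + 1)) ↔ 5 ≤ best e t (c + 1) by omega]
        rw [ih e (c + 1) (by omega) (by omega)]
        have h43 : (4:Int) - c ≤ 3 := by omega
        push_cast
        constructor
        · rintro (⟨hn, hq⟩ | hE)
          · exact Or.inl ⟨hn, by omega⟩
          · exact Or.inr (Or.inr hE)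
        · rintro (⟨hn, hq⟩ | ⟨hn, hq⟩ | hE)
          · exact Or.inl ⟨hn, by omega⟩
          · exact Or.inl ⟨hn, by omega⟩
          · exact Or.inr hE
    · have hbest : best p (e :: t) c = best e t 1 := by
        simp only [best, if_neg h]
      rw [hbest, ih e 1 (by omega) (by omega)]
      have hfalse : ¬ (p ≠ "hold" ∧ 5 - c ≤ (PR p (e :: t) : Int)) := by
        rintro ⟨hph, hle⟩
        by_cases hep : e = p
        · rcases not_and_or.mp h with h1 | h1
          · exact h1 hep
          · exact hph (hep ▸ not_not.mp h1)
        · have hz : PR p (e :: t) = 0 := by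
            simp [PR, beq_iff_eq, hep]
          rw [hz] at hle
          push_cast at hle
          omega
      constructor
      · rintro (⟨a, b⟩ | hE)
        · exact Or.inr (Or.inl ⟨a, by push_cast at b ⊢; omega⟩)
        · exact Or.inr (Or.inr hE)
      · rintro (hx | ⟨a, b⟩ | hE)
        · exact absurd hx hfalse
        · exact Or.inl ⟨a, by push_cast; omega⟩
        · exact Or.inr hE

theorem any_eq_E (ts : List String) :
    ((PySem.List.enumerate ts 0).any
      (fun p => p.2 ≠ "hold" && PySem.List.slice ts (some p.1) (some (p.1 + 5)) == List.replicate 5 p.2)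
      = true) ↔ E ts := by
  rw [List.any_eq_true]
  have h5 : (5 : Int) = ((5 : Nat) : Int) := by norm_num
  constructor
  · rintro ⟨p, hp, hf⟩
    rw [PySem.List.mem_enumerate_iff] at hp
    obtain ⟨k, hk, rfl⟩ := hp
    simp only [zero_add, Bool.and_eq_true, decide_eq_true_eq, beq_iff_eq] at hf
    obtain ⟨hne, hsl⟩ := hf
    rw [h5, PySem.List.slice_natCast_add] at hsl
    exact ⟨k, hk, by rw [List.getD_eq_getElem ts "" hk]; exact hne,
      by rw [List.getD_eq_getElem ts "" hk]; exact hsl⟩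
  · rintro ⟨k, hk, hne, hsl⟩
    refine ⟨((k : Int), ts[k]), ?_, ?_⟩
    · rw [PySem.List.mem_enumerate_iff]
      exact ⟨k, hk, by rw [zero_add]⟩
    · simp only [Bool.and_eq_true, decide_eq_true_eq, beq_iff_eq]
      rw [List.getD_eq_getElem ts "" hk] at hne hsl
      exact ⟨hne, by rw [h5, PySem.List.slice_natCast_add]; exact hsl⟩

-- ===== VERDICT (by name: the statement is the Claim_ definition above) =====
theorem infer_parameter_spec : Claim_equal_infer_parameter := by
  intro ah _ _
  unfold Spec_infer_parameter infer_parameter infer_parameter_alt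
  by_cases hlen : ah.length < 10
  · simp [hlen]
  · simp only [if_neg hlen]
    have hslice : PySem.List.slice ah (some (-20)) none = ah.drop (ah.length - 20) := by
      rw [PySem.List.slice_from_neg_ofNat ah 20 (by norm_num)]
    have hlen2 : 0 < ((PySem.List.slice ah (some (-20)) none).map
        (fun a => (List.lookup "type" a).getD "")).length := by
      rw [List.length_map, hslice, List.length_drop]
      omega
    generalize hts : (PySem.List.slice ah (some (-20)) none).map
        (fun a => (List.lookup "type" a).getD "") = ts at *
    cases ts with
    | nil => simp at hlen2
    | cons x r =>
      have hA : ((5 : Int) ≤ (runA x r ((1 : Int), (1 : Int))).1) ↔ E (x :: r) := by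
        rw [runA_fst r x 1 1 le_rfl]
        rw [show ((5:Int) ≤ max 1 (best x r 1)) ↔ (5 ≤ best x r 1) by omega]
        rw [best_ge_iff r x 1 le_rfl (by norm_num), E_cons]
        constructor
        · rintro (⟨a, b⟩ | hE)
          · exact Or.inl ⟨a, by push_cast at b ⊢; omega⟩
          · exact Or.inr hE
        · rintro (⟨a, b⟩ | hE)
          · exact Or.inl ⟨a, by push_cast; omega⟩
          · exact Or.inr hE
      have hB := any_eq_E (x :: r)
      rw [pyfold_eq_runA x r]
      by_cases hE : E (x :: r)
      · rw [if_pos (hA.mpr hE : (runA x r ((1:Int),(1:Int))).1 ≥ 5), if_pos (hB.mpr hE)]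
      · rw [if_neg (fun h => hE (hA.mp h) : ¬ (runA x r ((1:Int),(1:Int))).1 ≥ 5),
          if_neg (fun h => hE (hB.mp h))]
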